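-- pv_equiv track=rewrite | github.com/YangMechanicsGroupUTAustin/DIC-ROI-mask-generator | core/preprocessing.py | parse_custom_frames
-- ===== SOURCE A (Python) =====
-- def parse_custom_frames(spec: str, total_frames: int) -> list[int]:
--     """Parse a custom frame range string into a sorted list of 0-based indices.
--
--     Accepts comma-separated values and ranges (1-indexed, inclusive).
--     Examples: "1-10, 15, 20-30"  →  [0,1,...,9, 14, 19,...,29]
--
--     Invalid tokens are silently skipped. Out-of-range values are clamped.
--     """
--     if not spec or not spec.strip():
--         return list(range(total_frames))
--
--     indices: set[int] = set()
--     for token in spec.split(","):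
--         token = token.strip()
--         if not token:
--             continue
--         if "-" in token:
--             parts = token.split("-", 1)
--             try:
--                 start = max(1, int(parts[0].strip()))
--                 end = min(total_frames, int(parts[1].strip()))
--                 indices.update(range(start - 1, end))
--             except (ValueError, IndexError):
--                 continue
--         else:
--             try:
--                 val = int(token)
--                 if 1 <= val <= total_frames:
--                     indices.add(val - 1)
--             except ValueError:
--                 continue
--
--     return sorted(indices)
-- ===== SOURCE B (Python) =====
-- def parse_custom_frames(spec: str, total_frames: int) -> list[int]:
--     """Interval-merge reimplementation: collect clamped (lo, hi) half-open
--     intervals per token, sort them by start, merge overlaps, and emit the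
--     merged runs in one ordered pass (no per-index set, no final sort)."""
--     if not spec or not spec.strip():
--         return list(range(total_frames))
--
--     ivals: list[tuple[int, int]] = []
--     for token in spec.split(","):
--         token = token.strip()
--         if not token:
--             continue
--         if "-" in token:
--             parts = token.split("-", 1)
--             try:
--                 lo = max(1, int(parts[0].strip())) - 1
--                 hi = min(total_frames, int(parts[1].strip()))
--             except ValueError:
--                 continue
--             if lo < hi:
--                 ivals.append((lo, hi))
--         else:
--             try:
--                 val = int(token)
--             except ValueError:
--                 continue
--             if 1 <= val <= total_frames:
--                 ivals.append((val - 1, val))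
--
--     ivals.sort(key=lambda p: p[0])
--     out: list[int] = []
--     cur = None
--     for lo, hi in ivals:
--         if cur is None:
--             cur = (lo, hi)
--         elif lo <= cur[1]:
--             cur = (cur[0], max(cur[1], hi))
--         else:
--             out.extend(range(cur[0], cur[1]))
--             cur = (lo, hi)
--     if cur is not None:
--         out.extend(range(cur[0], cur[1]))
--     return out
-- ===== Notes on version B (the rewrite author's own statement) =====
-- stated objective: alternative
-- what changed: B replaces A's per-index hash set plus final sort by collecting clamped (lo, hi) half-open intervals per token, sorting the intervals by start, and merging overlaps while emitting the result in one ordered pass, so no per-index set and no sort over individual indices is needed.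
import Mathlib
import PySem

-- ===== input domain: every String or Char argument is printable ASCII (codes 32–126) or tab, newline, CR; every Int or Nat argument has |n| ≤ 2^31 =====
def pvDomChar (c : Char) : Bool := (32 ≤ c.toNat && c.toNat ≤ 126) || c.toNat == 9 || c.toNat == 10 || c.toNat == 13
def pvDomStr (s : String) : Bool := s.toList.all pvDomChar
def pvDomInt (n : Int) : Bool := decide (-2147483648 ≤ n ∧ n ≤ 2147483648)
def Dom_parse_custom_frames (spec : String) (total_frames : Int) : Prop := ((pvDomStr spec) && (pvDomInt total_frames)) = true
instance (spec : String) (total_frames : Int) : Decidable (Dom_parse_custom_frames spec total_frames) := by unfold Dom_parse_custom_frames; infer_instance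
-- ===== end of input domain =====

-- B replaces A's per-index set + final sort by clamped (lo, hi) intervals sorted by start and merged in one ordered emission pass (objective: alternative).

-- ===== PORT A =====
-- one token of A's loop: update the index set with the token's frames
def pvTokA (total_frames : Int) (s : PySem.Set Int) (token : String) : PySem.Set Int :=
  if (PySem.Str.strip token).toList.isEmpty then s
  else if PySem.Str.isIn "-" (PySem.Str.strip token) then
    match PySem.List.pyGet? ((PySem.Str.splitMax? (PySem.Str.strip token) "-" 1).getD []) 0,
          PySem.List.pyGet? ((PySem.Str.splitMax? (PySem.Str.strip token) "-" 1).getD []) 1 with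
    | some p0, some p1 =>
      match PySem.Int.ofStr? (PySem.Str.strip p0), PySem.Int.ofStr? (PySem.Str.strip p1) with
      | some a, some b =>
          PySem.Set.update s (PySem.List.pyRange (max 1 a - 1) (min total_frames b) 1)
      | _, _ => s
    | _, _ => s
  else
    match PySem.Int.ofStr? (PySem.Str.strip token) with
    | some v => if 1 ≤ v ∧ v ≤ total_frames then PySem.Set.add s (v - 1) else s
    | none => s

def parse_custom_frames (spec : String) (total_frames : Int) : List Int :=
  if spec.toList.isEmpty || (PySem.Str.strip spec).toList.isEmpty then
    PySem.List.pyRange 0 total_frames 1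
  else
    PySem.List.sorted
      (((PySem.Str.split? spec ",").getD []).foldl (pvTokA total_frames) PySem.Set.empty)
      (fun x => x) false

-- ===== PORT B =====
-- one token of B's loop: append the clamped interval when it is non-empty
def pvTokB (total_frames : Int) (ivals : List (Int × Int)) (token : String) : List (Int × Int) :=
  if (PySem.Str.strip token).toList.isEmpty then ivals
  else if PySem.Str.isIn "-" (PySem.Str.strip token) then
    match PySem.List.pyGet? ((PySem.Str.splitMax? (PySem.Str.strip token) "-" 1).getD []) 0,
          PySem.List.pyGet? ((PySem.Str.splitMax? (PySem.Str.strip token) "-" 1).getD []) 1 with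
    | some p0, some p1 =>
      match PySem.Int.ofStr? (PySem.Str.strip p0), PySem.Int.ofStr? (PySem.Str.strip p1) with
      | some a, some b =>
          if max 1 a - 1 < min total_frames b then ivals ++ [(max 1 a - 1, min total_frames b)]
          else ivals
      | _, _ => ivals
    | _, _ => ivals
  else
    match PySem.Int.ofStr? (PySem.Str.strip token) with
    | some v => if 1 ≤ v ∧ v ≤ total_frames then ivals ++ [(v - 1, v)] else ivals
    | none => ivals

-- one interval of B's merge loop
def pvMerge (st : List Int × Option (Int × Int)) (iv : Int × Int) : List Int × Option (Int × Int) :=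
  match st.2 with
  | none => (st.1, some iv)
  | some c =>
      if iv.1 ≤ c.2 then (st.1, some (c.1, max c.2 iv.2))
      else (st.1 ++ PySem.List.pyRange c.1 c.2 1, some iv)

def parse_custom_frames_alt (spec : String) (total_frames : Int) : List Int :=
  if (PySem.Str.strip spec).toList.isEmpty then
    PySem.List.pyRange 0 total_frames 1
  else
    match ((PySem.List.sorted (((PySem.Str.split? spec ",").getD []).foldl (pvTokB total_frames) [])
            (fun p => p.1) false).foldl pvMerge ([], none)) with
    | (out, none) => out
    | (out, some c) => out ++ PySem.List.pyRange c.1 c.2 1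

-- ===== PRECONDITION & SPEC =====
def Spec_parse_custom_frames (spec : String) (total_frames : Int) (out : List Int) : Prop := out = parse_custom_frames_alt spec total_frames
instance (spec : String) (total_frames : Int) (out : List Int) : Decidable (Spec_parse_custom_frames spec total_frames out) := by unfold Spec_parse_custom_frames; infer_instance

-- ===== CLAIM (what is proved, stated in full; the proofs are below) =====
def Claim_equal_parse_custom_frames : Prop := ∀ (spec : String) (total_frames : Int), Dom_parse_custom_frames spec total_frames → Spec_parse_custom_frames spec total_frames (parse_custom_frames spec total_frames)

-- ===== LEMMAS AND PROOFS =====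

-- the set of frames covered by an interval list
def pvCovers (ivals : List (Int × Int)) (x : Int) : Prop := ∃ iv ∈ ivals, iv.1 ≤ x ∧ x < iv.2

theorem pvCovers_append (l₁ l₂ : List (Int × Int)) (x : Int) :
    pvCovers (l₁ ++ l₂) x ↔ pvCovers l₁ x ∨ pvCovers l₂ x := by
  simp [pvCovers, or_and_right, exists_or]

theorem pvTok_link (tf : Int) (s : PySem.Set Int) (ivals : List (Int × Int)) (t : String)
    (hnd : s.Nodup) (hmem : ∀ x, x ∈ s ↔ pvCovers ivals x)
    (hne : ∀ iv ∈ ivals, iv.1 < iv.2) :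
    (pvTokA tf s t).Nodup ∧ (∀ x, x ∈ pvTokA tf s t ↔ pvCovers (pvTokB tf ivals t) x) ∧
    (∀ iv ∈ pvTokB tf ivals t, iv.1 < iv.2) := by
  unfold pvTokA pvTokB
  generalize PySem.Str.strip t = t'
  by_cases h1 : t'.toList.isEmpty = true
  · rw [if_pos h1, if_pos h1]; exact ⟨hnd, hmem, hne⟩
  rw [if_neg h1, if_neg h1]
  by_cases h2 : PySem.Str.isIn "-" t' = true
  · rw [if_pos h2, if_pos h2]
    generalize (PySem.Str.splitMax? t' "-" 1).getD [] = parts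
    cases hp0 : PySem.List.pyGet? parts 0 with
    | none => simp only [hp0]; exact ⟨hnd, hmem, hne⟩
    | some p0 =>
      cases hp1 : PySem.List.pyGet? parts 1 with
      | none => simp only [hp0, hp1]; exact ⟨hnd, hmem, hne⟩
      | some p1 =>
        cases ha : PySem.Int.ofStr? (PySem.Str.strip p0) with
        | none => simp only [hp0, hp1, ha]; exact ⟨hnd, hmem, hne⟩
        | some a =>
          cases hb : PySem.Int.ofStr? (PySem.Str.strip p1) with
          | none => simp only [hp0, hp1, ha, hb]; exact ⟨hnd, hmem, hne⟩
          | some b =>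
            simp only [hp0, hp1, ha, hb]
            refine ⟨PySem.Set.nodup_update _ _ hnd, ?_, ?_⟩
            · intro x
              rw [PySem.Set.mem_update, hmem x]
              by_cases hlh : max 1 a - 1 < min tf b
              · rw [if_pos hlh, pvCovers_append]
                simp only [pvCovers, List.mem_singleton, PySem.List.mem_pyRange_one]
                constructor
                · rintro (h | h)
                  · exact Or.inl h
                  · exact Or.inr ⟨_, rfl, h⟩
                · rintro (h | ⟨iv, rfl, hx⟩)
                  · exact Or.inl h
                  · exact Or.inr hx
              · rw [if_neg hlh]
                rw [PySem.List.pyRange_one_eq_nil (by omega)]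
                simp [pvCovers]
            · by_cases hlh : max 1 a - 1 < min tf b
              · rw [if_pos hlh]
                intro iv hiv
                rcases List.mem_append.1 hiv with h | h
                · exact hne iv h
                · simp only [List.mem_singleton] at h; subst h; exact hlh
              · rw [if_neg hlh]; exact hne
  · rw [if_neg h2, if_neg h2]
    cases hv : PySem.Int.ofStr? t' with
    | none => simp only [hv]; exact ⟨hnd, hmem, hne⟩
    | some v =>
      simp only [hv]
      by_cases hr : 1 ≤ v ∧ v ≤ tf
      · rw [if_pos hr, if_pos hr]
        refine ⟨PySem.Set.nodup_add _ _ hnd, ?_, ?_⟩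
        · intro x
          rw [PySem.Set.mem_add, hmem x, pvCovers_append]
          simp only [pvCovers, List.mem_singleton]
          constructor
          · rintro (h | h)
            · exact Or.inl h
            · exact Or.inr ⟨(v - 1, v), rfl, by omega⟩
          · rintro (h | ⟨iv, rfl, hx⟩)
            · exact Or.inl h
            · simp only at hx; right; omega
        · intro iv hiv
          rcases List.mem_append.1 hiv with h | h
          · exact hne iv h
          · simp only [List.mem_singleton] at h; subst h; simp only; omega
      · rw [if_neg hr, if_neg hr]; exact ⟨hnd, hmem, hne⟩

def pvRender (st : List Int × Option (Int × Int)) : List Int :=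
  match st with
  | (out, none) => out
  | (out, some c) => out ++ PySem.List.pyRange c.1 c.2 1

theorem pvMerge_spec (ivs : List (Int × Int)) :
    ∀ (out : List Int) (cur : Option (Int × Int)),
    ivs.Pairwise (fun a b => a.1 ≤ b.1) →
    (∀ iv ∈ ivs, iv.1 < iv.2) →
    out.Pairwise (· < ·) →
    (∀ c, cur = some c → c.1 < c.2 ∧ (∀ y ∈ out, y < c.1) ∧ (∀ iv ∈ ivs, c.1 ≤ iv.1)) →
    (cur = none → out = []) →
    (pvRender (ivs.foldl pvMerge (out, cur))).Pairwise (· < ·) ∧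
    (∀ x, x ∈ pvRender (ivs.foldl pvMerge (out, cur)) ↔
      (x ∈ out ∨ (∃ c, cur = some c ∧ c.1 ≤ x ∧ x < c.2) ∨ pvCovers ivs x)) := by
  induction ivs with
  | nil =>
    intro out cur hsorted hne hout hcur hnone
    cases cur with
    | none =>
      refine ⟨hout, fun x => ?_⟩
      simp [pvRender, pvCovers]
    | some c =>
      obtain ⟨hc1, hc2, _⟩ := hcur c rfl
      constructor
      · refine List.pairwise_append.2 ⟨hout, PySem.List.pairwise_lt_pyRange_one _ _, ?_⟩
        intro y hy z hz
        have hz' := PySem.List.mem_pyRange_one.1 hz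
        have := hc2 y hy
        omega
      · intro x
        simp only [List.foldl_nil, pvRender, List.mem_append, PySem.List.mem_pyRange_one,
          pvCovers, List.not_mem_nil, false_and, exists_const, or_false]
        constructor
        · rintro (h | h)
          · exact Or.inl h
          · exact Or.inr ⟨c, rfl, h⟩
        · rintro (h | ⟨c', hc', hx⟩)
          · exact Or.inl h
          · injection hc' with hh; subst hh; exact Or.inr hx
  | cons iv ivs ih =>
    intro out cur hsorted hne hout hcur hnone
    rw [List.pairwise_cons] at hsorted
    rw [List.foldl_cons]
    cases cur with
    | none =>
      have hout0 : out = [] := hnone rfl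
      subst hout0
      have step : pvMerge ([], none) iv = ([], some iv) := rfl
      rw [step]
      obtain ⟨r1, r2⟩ := ih [] (some iv) hsorted.2
        (fun j hj => hne j (List.mem_cons_of_mem _ hj)) List.Pairwise.nil
        (by
          rintro c hc
          injection hc with hh; subst hh
          exact ⟨hne iv List.mem_cons_self, by simp, hsorted.1⟩)
        (by intro h; cases h)
      refine ⟨r1, fun x => ?_⟩
      rw [r2 x]
      simp only [List.not_mem_nil, false_or, pvCovers]
      constructor
      · rintro (⟨c', hc', hx⟩ | h)
        · injection hc' with hh; subst hh
          exact Or.inr ⟨iv, List.mem_cons_self, hx⟩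
        · rcases h with ⟨j, hj, hx⟩
          exact Or.inr ⟨j, List.mem_cons_of_mem _ hj, hx⟩
      · rintro (⟨c', hc', hx⟩ | ⟨j, hj, hx⟩)
        · cases hc'
        · rcases List.mem_cons.1 hj with rfl | hj'
          · exact Or.inl ⟨j, rfl, hx⟩
          · exact Or.inr ⟨j, hj', hx⟩
    | some c =>
      obtain ⟨hc1, hc2, hc3⟩ := hcur c rfl
      have hivne := hne iv List.mem_cons_self
      have hivlo := hc3 iv List.mem_cons_self
      by_cases hm : iv.1 ≤ c.2
      · have step : pvMerge (out, some c) iv = (out, some (c.1, max c.2 iv.2)) := by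
          simp [pvMerge, hm]
        rw [step]
        obtain ⟨r1, r2⟩ := ih out (some (c.1, max c.2 iv.2)) hsorted.2
          (fun j hj => hne j (List.mem_cons_of_mem _ hj)) hout
          (by
            rintro c' hc'
            injection hc' with hh; subst hh
            refine ⟨by simp only; omega, hc2, ?_⟩
            intro j hj
            exact le_trans hivlo (hsorted.1 j hj))
          (by intro h; cases h)
        refine ⟨r1, fun x => ?_⟩
        rw [r2 x]
        constructor
        · rintro (h | ⟨c', hc', hx⟩ | h)
          · exact Or.inl h
          · injection hc' with hh; subst hh
            simp only at hx
            by_cases hx2 : x < c.2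
            · exact Or.inr (Or.inl ⟨c, rfl, hx.1, hx2⟩)
            · refine Or.inr (Or.inr ⟨iv, List.mem_cons_self, by omega⟩)
          · rcases h with ⟨j, hj, hx⟩
            exact Or.inr (Or.inr ⟨j, List.mem_cons_of_mem _ hj, hx⟩)
        · rintro (h | ⟨c', hc', hx⟩ | ⟨j, hj, hx⟩)
          · exact Or.inl h
          · injection hc' with hh; subst hh
            exact Or.inr (Or.inl ⟨(c.1, max c.2 iv.2), rfl, by simp only; omega⟩)
          · rcases List.mem_cons.1 hj with rfl | hj'
            · exact Or.inr (Or.inl ⟨(c.1, max c.2 j.2), rfl, by simp only; omega⟩)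
            · exact Or.inr (Or.inr ⟨j, hj', hx⟩)
      · have step : pvMerge (out, some c) iv =
            (out ++ PySem.List.pyRange c.1 c.2 1, some iv) := by
          simp [pvMerge, hm]
        rw [step]
        have hout' : (out ++ PySem.List.pyRange c.1 c.2 1).Pairwise (· < ·) := by
          refine List.pairwise_append.2 ⟨hout, PySem.List.pairwise_lt_pyRange_one _ _, ?_⟩
          intro y hy z hz
          have hz' := PySem.List.mem_pyRange_one.1 hz
          have := hc2 y hy
          omega
        obtain ⟨r1, r2⟩ := ih (out ++ PySem.List.pyRange c.1 c.2 1) (some iv) hsorted.2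
          (fun j hj => hne j (List.mem_cons_of_mem _ hj)) hout'
          (by
            rintro c' hc'
            injection hc' with hh; subst hh
            refine ⟨hivne, ?_, hsorted.1⟩
            intro y hy
            rcases List.mem_append.1 hy with h' | h'
            · have := hc2 y h'; omega
            · have := PySem.List.mem_pyRange_one.1 h'; omega)
          (by intro h; cases h)
        refine ⟨r1, fun x => ?_⟩
        rw [r2 x]
        simp only [List.mem_append, PySem.List.mem_pyRange_one]
        constructor
        · rintro ((h | h) | ⟨c', hc', hx⟩ | h)
          · exact Or.inl h
          · exact Or.inr (Or.inl ⟨c, rfl, h⟩)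
          · injection hc' with hh; subst hh
            exact Or.inr (Or.inr ⟨iv, List.mem_cons_self, hx⟩)
          · rcases h with ⟨j, hj, hx⟩
            exact Or.inr (Or.inr ⟨j, List.mem_cons_of_mem _ hj, hx⟩)
        · rintro (h | ⟨c', hc', hx⟩ | ⟨j, hj, hx⟩)
          · exact Or.inl (Or.inl h)
          · injection hc' with hh; subst hh
            exact Or.inl (Or.inr hx)
          · rcases List.mem_cons.1 hj with rfl | hj'
            · exact Or.inr (Or.inl ⟨j, rfl, hx⟩)
            · exact Or.inr (Or.inr ⟨j, hj', hx⟩)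

theorem pvFold_link (tf : Int) (toks : List String) :
    ∀ (s : PySem.Set Int) (ivals : List (Int × Int)),
    s.Nodup → (∀ x, x ∈ s ↔ pvCovers ivals x) → (∀ iv ∈ ivals, iv.1 < iv.2) →
    (toks.foldl (pvTokA tf) s).Nodup ∧
    (∀ x, x ∈ toks.foldl (pvTokA tf) s ↔ pvCovers (toks.foldl (pvTokB tf) ivals) x) ∧
    (∀ iv ∈ toks.foldl (pvTokB tf) ivals, iv.1 < iv.2) := by
  induction toks with
  | nil => intro s ivals h1 h2 h3; exact ⟨h1, h2, h3⟩
  | cons t ts ih =>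
    intro s ivals h1 h2 h3
    obtain ⟨g1, g2, g3⟩ := pvTok_link tf s ivals t h1 h2 h3
    exact ih _ _ g1 g2 g3

theorem pvMain (spec : String) (tf : Int) :
    parse_custom_frames spec tf = parse_custom_frames_alt spec tf := by
  unfold parse_custom_frames parse_custom_frames_alt
  have hblank : (spec.toList.isEmpty || (PySem.Str.strip spec).toList.isEmpty)
      = (PySem.Str.strip spec).toList.isEmpty := by
    by_cases h : spec.toList = []
    · rw [PySem.Str.toList_strip, h]; rfl
    · simp [List.isEmpty_iff, h]
  rw [hblank]
  by_cases h : (PySem.Str.strip spec).toList.isEmpty = true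
  · rw [if_pos h, if_pos h]
  · rw [if_neg h, if_neg h]
    obtain ⟨hnd, hmem, hne⟩ := pvFold_link tf ((PySem.Str.split? spec ",").getD [])
      PySem.Set.empty [] List.nodup_nil
      (by intro x; simp [PySem.Set.empty, pvCovers])
      (by intro iv h'; cases h')
    have hperm : (PySem.List.sorted (((PySem.Str.split? spec ",").getD []).foldl (pvTokB tf) [])
        (fun p => p.1) false).Perm (((PySem.Str.split? spec ",").getD []).foldl (pvTokB tf) []) :=
      PySem.List.sorted_perm _ _ _
    obtain ⟨r1, r2⟩ := pvMerge_spec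
      (PySem.List.sorted (((PySem.Str.split? spec ",").getD []).foldl (pvTokB tf) [])
        (fun p => p.1) false) [] none
      (PySem.List.sorted_pairwise _ _)
      (fun j hj => hne j (hperm.mem_iff.1 hj))
      List.Pairwise.nil (by intro c h'; cases h') (fun _ => rfl)
    show _ = pvRender _
    refine PySem.List.sorted_eq_of_perm_of_pairwise_lt _ _ _ ?_ r1
    refine (List.perm_ext_iff_of_nodup r1.nodup hnd).2 ?_
    intro x
    rw [r2 x, hmem x]
    have hpc : pvCovers (PySem.List.sorted (((PySem.Str.split? spec ",").getD []).foldl (pvTokB tf) [])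
        (fun p => p.1) false) x ↔
        pvCovers (((PySem.Str.split? spec ",").getD []).foldl (pvTokB tf) []) x := by
      unfold pvCovers
      exact ⟨fun ⟨j, hj, hx⟩ => ⟨j, hperm.mem_iff.1 hj, hx⟩,
             fun ⟨j, hj, hx⟩ => ⟨j, hperm.mem_iff.2 hj, hx⟩⟩
    rw [hpc]
    simp

-- ===== VERDICT (by name: the statement is the Claim_ definition above) =====
theorem parse_custom_frames_spec : Claim_equal_parse_custom_frames := by
  intro spec tf _
  show parse_custom_frames spec tf = parse_custom_frames_alt spec tf
  exact pvMain spec tf
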